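-- pv_equiv track=rewrite | github.com/Billybar/py-exam | 25a_m-62/q3.py | match_width
-- ===== SOURCE A (Python) =====
-- def match_width(lst,total,k):
--
--     # if cannot be k = 0 then:
--     if k == 0:
--         return False
--
--     if k >= len(lst):
--         return False
--
--     if not lst:
--         return False
--
--     if lst[0] + lst[k] == total:
--         return True
--
--     return match_width(lst[1:], total, k)
-- ===== SOURCE B (Python) =====
-- def match_width(lst, total, k):
--     # single pass over indices: is there i with lst[i] + lst[i+k] == total?
--     if k <= 0:
--         return False
--     return any(lst[i] + lst[i + k] == total for i in range(len(lst) - k))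
-- ===== Notes on version B (the rewrite author's own statement) =====
-- stated objective: faster
-- what changed: Replaces the slicing recursion (which copies the list's tail at every step) by a single index loop checking lst[i]+lst[i+k]==total.
-- outside the precondition, e.g. on match_width([1, 2, 3], 4, -1): A returns True, B returns False
import Mathlib
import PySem

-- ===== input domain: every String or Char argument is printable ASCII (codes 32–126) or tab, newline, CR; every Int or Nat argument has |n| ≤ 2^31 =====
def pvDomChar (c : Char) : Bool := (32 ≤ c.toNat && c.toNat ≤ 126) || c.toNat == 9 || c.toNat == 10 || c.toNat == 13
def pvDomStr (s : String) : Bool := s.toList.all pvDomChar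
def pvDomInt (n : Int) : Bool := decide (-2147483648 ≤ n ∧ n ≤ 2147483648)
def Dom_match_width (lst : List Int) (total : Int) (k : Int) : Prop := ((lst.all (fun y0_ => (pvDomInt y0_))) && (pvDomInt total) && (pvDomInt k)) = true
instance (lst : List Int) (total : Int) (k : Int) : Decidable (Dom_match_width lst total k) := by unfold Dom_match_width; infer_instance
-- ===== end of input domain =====

-- B replaces A's tail-slicing recursion by a single index scan over i with lst[i]+lst[i+k]==total (measured faster: asymptotic).


-- ===== PORT A =====
def match_width (lst : List Int) (total : Int) (k : Int) : Bool :=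
  if k == 0 then false
  else if k ≥ (lst.length : Int) then false
  else if lst = [] then false
  else if PySem.List.pyGetD lst 0 0 + PySem.List.pyGetD lst k 0 == total then true
  else match_width (PySem.List.slice lst (some 1) none) total k
termination_by lst.length
decreasing_by
  have h1 : PySem.List.slice lst (some ((1:Nat):Int)) none = lst.drop 1 :=
    PySem.List.slice_from_natCast lst 1
  simp only [Nat.cast_one] at h1
  simp [h1]
  cases lst with
  | nil => simp_all
  | cons x xs => simp

-- ===== PORT B =====
def match_width_alt (lst : List Int) (total : Int) (k : Int) : Bool :=
  if k ≤ 0 then false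
  else (PySem.List.pyRange 0 ((lst.length : Int) - k) 1).any
    (fun i => PySem.List.pyGetD lst i 0 + PySem.List.pyGetD lst (i + k) 0 == total)

-- ===== PRECONDITION & SPEC =====
-- Pre_ restricts to the natural domain k ≥ 0: a negative gap width is outside the task's
-- natural domain — there A either raises IndexError (k < -len) or returns an accidental
-- negative-index-wraparound value (pairing every element with the fixed element lst[len+k]).
def Pre_match_width (lst : List Int) (total : Int) (k : Int) : Prop := 0 ≤ k
instance (lst : List Int) (total : Int) (k : Int) : Decidable (Pre_match_width lst total k) := by unfold Pre_match_width; infer_instance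
def pvWitness_match_width : List Int × Int × Int := ([1, 2, 3, 4], 5, 2)
def Spec_match_width (lst : List Int) (total : Int) (k : Int) (out : Bool) : Prop := out = match_width_alt lst total k
instance (lst : List Int) (total : Int) (k : Int) (out : Bool) : Decidable (Spec_match_width lst total k out) := by unfold Spec_match_width; infer_instance

-- ===== CLAIM (what is proved, stated in full; the proofs are below) =====
def Claim_equal_match_width : Prop := ∀ (lst : List Int) (total : Int) (k : Int), Dom_match_width lst total k → Pre_match_width lst total k → Spec_match_width lst total k (match_width lst total k)

-- ===== LEMMAS AND PROOFS =====

-- common characterisation: some j pairs with j+k to total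
def pairAt (lst : List Int) (total : Int) (kn : Nat) : Prop :=
  ∃ j : Nat, j + kn < lst.length ∧ lst.getD j 0 + lst.getD (j + kn) 0 = total

theorem getD_bridge (lst : List Int) (i : Int) (h0 : 0 ≤ i) (h1 : i < (lst.length : Int)) :
    PySem.List.pyGetD lst i 0 = lst.getD i.toNat 0 := by
  rw [PySem.List.pyGetD_eq_getElem lst 0 h0 h1, List.getD_eq_getElem _ _ (by omega)]

theorem matchA_iff (lst : List Int) (total : Int) (k : Int) (hk : 0 < k) :
    match_width lst total k = true ↔ pairAt lst total k.toNat := by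
  induction lst with
  | nil =>
    rw [match_width]
    have : (k == 0) = false := by simp; omega
    simp [this, pairAt]
  | cons x xs ih =>
    rw [match_width]
    have hk0 : (k == 0) = false := by simp; omega
    by_cases hlen : k ≥ (((x :: xs).length : Int))
    · simp only [hk0, Bool.false_eq_true, if_false, hlen, if_true]
      simp [pairAt]
      intro j hj
      simp at hlen
      omega
    · have hslice : PySem.List.slice (x :: xs) (some ((1:Nat):Int)) none = xs :=
        PySem.List.slice_from_natCast (x :: xs) 1
      simp only [Nat.cast_one] at hslice
      have hkl : k < ((x :: xs).length : Int) := by omega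
      have hget : PySem.List.pyGetD (x :: xs) k 0 = (x :: xs).getD k.toNat 0 :=
        getD_bridge _ _ (by omega) hkl
      simp only [hk0, Bool.false_eq_true, if_false, hlen,
        reduceCtorEq, hslice, PySem.List.pyGetD_zero_cons, hget]
      rw [show (if (x + (x :: xs).getD k.toNat 0 == total) = true then true
            else match_width xs total k)
          = ((x + (x :: xs).getD k.toNat 0 == total) || match_width xs total k) by
        cases h : (x + (x :: xs).getD k.toNat 0 == total) <;> simp]
      rw [Bool.or_eq_true, ih, beq_iff_eq]
      constructor
      · rintro (h | ⟨j, hj, hv⟩)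
        · exact ⟨0, by simp at hkl ⊢; omega, by simpa using h⟩
        · refine ⟨j + 1, by simp; omega, ?_⟩
          have e1 : (x :: xs).getD (j + 1) 0 = xs.getD j 0 := rfl
          have e2 : (x :: xs).getD (j + 1 + k.toNat) 0 = xs.getD (j + k.toNat) 0 := by
            rw [show j + 1 + k.toNat = (j + k.toNat) + 1 by omega]; rfl
          rw [e1, e2]; exact hv
      · rintro ⟨j, hj, hv⟩
        cases j with
        | zero => left; simpa using hv
        | succ j =>
          right
          refine ⟨j, by simp at hj; omega, ?_⟩
          have e1 : (x :: xs).getD (j + 1) 0 = xs.getD j 0 := rfl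
          have e2 : (x :: xs).getD (j + 1 + k.toNat) 0 = xs.getD (j + k.toNat) 0 := by
            rw [show j + 1 + k.toNat = (j + k.toNat) + 1 by omega]; rfl
          rw [e1, e2] at hv; exact hv

theorem matchB_iff (lst : List Int) (total : Int) (k : Int) (hk : 0 < k) :
    match_width_alt lst total k = true ↔ pairAt lst total k.toNat := by
  unfold match_width_alt
  have hk0 : ¬ (k ≤ 0) := by omega
  rw [if_neg hk0, List.any_eq_true]
  constructor
  · rintro ⟨i, hi, hv⟩
    rw [PySem.List.mem_pyRange_one] at hi
    refine ⟨i.toNat, by omega, ?_⟩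
    rw [getD_bridge lst i (by omega) (by omega),
        getD_bridge lst (i + k) (by omega) (by omega)] at hv
    rw [show (i + k).toNat = i.toNat + k.toNat by omega] at hv
    exact beq_iff_eq.mp hv
  · rintro ⟨j, hj, hv⟩
    refine ⟨(j : Int), ?_, ?_⟩
    · rw [PySem.List.mem_pyRange_one]; omega
    · rw [getD_bridge lst j (by omega) (by omega),
          getD_bridge lst ((j : Int) + k) (by omega) (by omega)]
      rw [show (((j : Int) + k)).toNat = j + k.toNat by omega, Int.toNat_natCast]
      exact beq_iff_eq.mpr hv

-- ===== VERDICT (by name: the statement is the Claim_ definition above) =====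
theorem match_width_spec : Claim_equal_match_width := by
  intro lst total k _ hpre
  unfold Spec_match_width
  rcases lt_or_eq_of_le hpre with hk | hk
  · rw [Bool.eq_iff_iff, matchA_iff lst total k hk, matchB_iff lst total k hk]
  · subst hk; simp [match_width, match_width_alt]
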